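-- pv_equiv track=rewrite | github.com/oppo-us-research/USST | preprocess/EgoPAT3D/step1_split_videos_with_landmarks.py | get_hand_clip
-- ===== SOURCE A (Python) =====
-- def get_hand_clip(start, end, landmarks):
--     # get the first frame which has landmarks of hands
--     first_frame = start
--     while first_frame < end:
--         if first_frame in landmarks:
--             break
--         first_frame += 1
--     # get the last frame which has landmakrs of hands
--     last_frame = end
--     while last_frame > first_frame:
--         if last_frame in landmarks:
--             break
--         last_frame -= 1
--     return first_frame, last_frame
-- ===== SOURCE B (Python) =====
-- def get_hand_clip(start, end, landmarks):
--     if start >= end: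
--         return start, end
--     first_frame = min((f for f in landmarks if start <= f < end), default=end)
--     last_frame = max((f for f in landmarks if first_frame < f <= end), default=first_frame)
--     return first_frame, last_frame
-- ===== Notes on version B (the rewrite author's own statement) =====
-- stated objective: idiomatic
-- what changed: Replaces A's two frame-by-frame scans over the contiguous range [start,end] with a min over landmark keys in [start,end) (default end) and a max over keys in (first,end] (default first), after an explicit start>=end guard matching A's never-run loops.
import Mathlib
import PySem

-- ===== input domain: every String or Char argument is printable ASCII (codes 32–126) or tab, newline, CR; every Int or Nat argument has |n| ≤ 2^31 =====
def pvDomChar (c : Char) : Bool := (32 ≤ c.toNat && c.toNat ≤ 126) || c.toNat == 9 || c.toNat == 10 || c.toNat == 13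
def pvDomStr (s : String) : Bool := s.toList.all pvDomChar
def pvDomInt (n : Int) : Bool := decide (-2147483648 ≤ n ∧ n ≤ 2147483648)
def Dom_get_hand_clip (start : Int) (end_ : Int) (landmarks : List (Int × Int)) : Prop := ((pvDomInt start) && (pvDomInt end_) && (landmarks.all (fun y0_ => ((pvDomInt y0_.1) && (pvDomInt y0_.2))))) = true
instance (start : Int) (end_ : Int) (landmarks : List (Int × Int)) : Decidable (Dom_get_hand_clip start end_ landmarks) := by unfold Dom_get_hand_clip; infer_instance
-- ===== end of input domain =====

-- B replaces A's two frame-by-frame scans with min/max over the landmark keys within the same bounds (idiomatic; same measured cost).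

-- ===== PORT A =====
-- 'first_frame in landmarks' = dict key membership
def pvFirstLoop (end_ : Int) (lm : List (Int × Int)) (f : Int) : Int :=
  if f < end_ then
    if lm.any (fun p => p.1 == f) then f else pvFirstLoop end_ lm (f + 1)
  else f
termination_by (end_ - f).toNat
decreasing_by omega

def pvLastLoop (first : Int) (lm : List (Int × Int)) (l : Int) : Int :=
  if l > first then
    if lm.any (fun p => p.1 == l) then l else pvLastLoop first lm (l - 1)
  else l
termination_by (l - first).toNat
decreasing_by omega

def get_hand_clip (start : Int) (end_ : Int) (landmarks : List (Int × Int)) : Int × Int :=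
  let first_frame := pvFirstLoop end_ landmarks start
  let last_frame := pvLastLoop first_frame landmarks end_
  (first_frame, last_frame)

-- ===== PORT B =====
def get_hand_clip_alt (start : Int) (end_ : Int) (landmarks : List (Int × Int)) : Int × Int :=
  if start ≥ end_ then (start, end_)
  else
    let keys := landmarks.map Prod.fst
    let first_frame := ((keys.filter (fun f => start ≤ f && f < end_)).min?).getD end_
    let last_frame := ((keys.filter (fun f => first_frame < f && f ≤ end_)).max?).getD first_frame
    (first_frame, last_frame)

-- ===== PRECONDITION & SPEC =====
def Spec_get_hand_clip (start : Int) (end_ : Int) (landmarks : List (Int × Int)) (out : Int × Int) : Prop := out = get_hand_clip_alt start end_ landmarks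
instance (start : Int) (end_ : Int) (landmarks : List (Int × Int)) (out : Int × Int) : Decidable (Spec_get_hand_clip start end_ landmarks out) := by unfold Spec_get_hand_clip; infer_instance

-- ===== CLAIM (what is proved, stated in full; the proofs are below) =====
def Claim_equal_get_hand_clip : Prop := ∀ (start : Int) (end_ : Int) (landmarks : List (Int × Int)), Dom_get_hand_clip start end_ landmarks → Spec_get_hand_clip start end_ landmarks (get_hand_clip start end_ landmarks)

-- ===== LEMMAS AND PROOFS =====

-- membership in the key list ↔ the Bool test A's port uses
theorem pv_any_iff (lm : List (Int × Int)) (f : Int) :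
    lm.any (fun p => p.1 == f) = true ↔ f ∈ lm.map Prod.fst := by
  simp only [List.any_eq_true, beq_iff_eq, List.mem_map]

-- A's forward scan computes the least key in [f, end_), defaulting to end_
theorem pvFirstLoop_eq (end_ : Int) (lm : List (Int × Int)) :
    ∀ f : Int, f ≤ end_ →
      pvFirstLoop end_ lm f =
        (((lm.map Prod.fst).filter (fun k => f ≤ k && k < end_)).min?).getD end_ := by
  intro f hf
  generalize hn : (end_ - f).toNat = n
  induction n generalizing f with
  | zero =>
    rw [pvFirstLoop, if_neg (by omega)]
    have : (lm.map Prod.fst).filter (fun k => f ≤ k && k < end_) = [] := by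
      apply List.filter_eq_nil_iff.2
      intro k _; simp; omega
    rw [this]; simp; omega
  | succ n ih =>
  rw [pvFirstLoop]
  by_cases hlt : f < end_
  · simp only [if_pos hlt]
    by_cases hmem : lm.any (fun p => p.1 == f) = true
    · -- f is a key: the filtered list has min f
      rw [hmem, if_pos rfl]
      have hmin : ((lm.map Prod.fst).filter (fun k => f ≤ k && k < end_)).min? = some f := by
        rw [List.min?_eq_some_iff]
        constructor
        · rw [List.mem_filter]
          exact ⟨(pv_any_iff lm f).1 hmem, by simp; omega⟩
        · intro b hb
          rw [List.mem_filter] at hb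
          have := hb.2
          simp at this
          omega
      rw [hmin]; rfl
    · -- f is not a key: the filter is the same as the one starting at f+1
      simp only [hmem, if_neg, Bool.false_eq_true, not_false_eq_true]
      have hfilter : (lm.map Prod.fst).filter (fun k => f ≤ k && k < end_)
          = (lm.map Prod.fst).filter (fun k => f + 1 ≤ k && k < end_) := by
        apply List.filter_congr
        intro k hk
        have hne : k ≠ f := by
          intro h; exact hmem ((pv_any_iff lm f).2 (h ▸ hk))
        have hiff : (f ≤ k) ↔ (f + 1 ≤ k) := by omega
        simp [hiff]
      rw [hfilter]
      exact ih (f + 1) (by omega) (by omega)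
  · -- f = end_: filter is empty
    simp only [if_neg hlt]
    have : (lm.map Prod.fst).filter (fun k => f ≤ k && k < end_) = [] := by
      apply List.filter_eq_nil_iff.2
      intro k _; simp; omega
    rw [this]; simp; omega

-- A's backward scan computes the greatest key in (first, l], defaulting to first
theorem pvLastLoop_eq (first : Int) (lm : List (Int × Int)) :
    ∀ l : Int, first ≤ l →
      pvLastLoop first lm l =
        (((lm.map Prod.fst).filter (fun k => first < k && k ≤ l)).max?).getD first := by
  intro l hl
  generalize hn : (l - first).toNat = n
  induction n generalizing l with
  | zero =>
    rw [pvLastLoop, if_neg (by omega)]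
    have : (lm.map Prod.fst).filter (fun k => first < k && k ≤ l) = [] := by
      apply List.filter_eq_nil_iff.2
      intro k _; simp; omega
    rw [this]; simp; omega
  | succ n ih =>
  rw [pvLastLoop]
  by_cases hgt : l > first
  · simp only [if_pos hgt]
    by_cases hmem : lm.any (fun p => p.1 == l) = true
    · rw [hmem, if_pos rfl]
      have hmax : ((lm.map Prod.fst).filter (fun k => first < k && k ≤ l)).max? = some l := by
        rw [List.max?_eq_some_iff]
        constructor
        · rw [List.mem_filter]
          exact ⟨(pv_any_iff lm l).1 hmem, by simp; omega⟩
        · intro b hb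
          rw [List.mem_filter] at hb
          have := hb.2
          simp at this
          omega
      rw [hmax]; rfl
    · simp only [hmem, if_neg, Bool.false_eq_true, not_false_eq_true]
      have hfilter : (lm.map Prod.fst).filter (fun k => first < k && k ≤ l)
          = (lm.map Prod.fst).filter (fun k => first < k && k ≤ l - 1) := by
        apply List.filter_congr
        intro k hk
        have hne : k ≠ l := by
          intro h; exact hmem ((pv_any_iff lm l).2 (h ▸ hk))
        have hiff : (k ≤ l) ↔ (k ≤ l - 1) := by omega
        simp [hiff]
      rw [hfilter]
      exact ih (l - 1) (by omega) (by omega)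
  · simp only [if_neg hgt]
    have : (lm.map Prod.fst).filter (fun k => first < k && k ≤ l) = [] := by
      apply List.filter_eq_nil_iff.2
      intro k _; simp; omega
    rw [this]
    simp; omega

-- the first frame never exceeds end_
theorem pvFirst_le (start end_ : Int) (lm : List (Int × Int)) :
    (((lm.map Prod.fst).filter (fun k => start ≤ k && k < end_)).min?).getD end_ ≤ end_ := by
  cases hmin : ((lm.map Prod.fst).filter (fun k => start ≤ k && k < end_)).min? with
  | none => simp
  | some m =>
    have := (List.min?_eq_some_iff.1 hmin).1
    rw [List.mem_filter] at this
    have := this.2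
    simp at this
    simp
    omega

-- ===== VERDICT (by name: the statement is the Claim_ definition above) =====
theorem get_hand_clip_spec : Claim_equal_get_hand_clip := by
  intro start end_ lm _
  unfold Spec_get_hand_clip
  simp only [get_hand_clip, get_hand_clip_alt]
  by_cases h : start ≥ end_
  · -- A's loops never run
    have h1 : pvFirstLoop end_ lm start = start := by
      rw [pvFirstLoop, if_neg (by omega)]
    have h2 : pvLastLoop start lm end_ = end_ := by
      rw [pvLastLoop, if_neg (by omega)]
    rw [if_pos h, h1, h2]
  · rw [if_neg h]
    have hfirst := pvFirstLoop_eq end_ lm start (by omega)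
    have hle := pvFirst_le start end_ lm
    rw [hfirst, pvLastLoop_eq _ lm end_ hle]
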